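-- pv_equiv track=rewrite | github.com/greatzby/LLM8 | analyze_s13.py | precompute_reachability_map
-- ===== SOURCE A (Python) =====
-- from collections import Counter, defaultdict
-- from typing import Dict, List, Optional, Sequence, Tuple
--
-- def precompute_reachability_map(
--     stage_sets: Dict[str, set],
--     descendants_map: Dict[int, set],
-- ) -> Dict[int, set]:
--     """
--     构建 map: target -> {能够到达该 target 的 S2 节点}。
--     使用 descendants_map（target 是否在 S2 节点的后裔集合中）。
--     """
--     s2_nodes = stage_sets["S2"]
--     s3_nodes = stage_sets["S3"]
--     s3_to_valid_s2: Dict[int, set] = defaultdict(set)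
--
--     for s2 in s2_nodes:
--         reachable = descendants_map.get(s2, set())
--         for t in reachable:
--             if t in s3_nodes:
--                 s3_to_valid_s2[t].add(s2)
--     return s3_to_valid_s2
-- ===== SOURCE B (Python) =====
-- def precompute_reachability_map(stage_sets, descendants_map):
--     s2_nodes = stage_sets["S2"]
--     s3_nodes = stage_sets["S3"]
--     hits = [t for s2 in s2_nodes for t in descendants_map.get(s2, set()) if t in s3_nodes]
--     return {t: {s2 for s2 in s2_nodes if t in descendants_map.get(s2, set())}
--             for t in dict.fromkeys(hits)}
-- ===== Notes on version B (the rewrite author's own statement) =====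
-- stated objective: alternative
-- what changed: B transposes the computation: it flattens all (S2-node, descendant-in-S3) hits into one filtered list, dedups it to get the key set, and rebuilds each target's reaching set by a fresh membership scan over S2, instead of A's single-pass defaultdict-of-sets accumulation.
import Mathlib
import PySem

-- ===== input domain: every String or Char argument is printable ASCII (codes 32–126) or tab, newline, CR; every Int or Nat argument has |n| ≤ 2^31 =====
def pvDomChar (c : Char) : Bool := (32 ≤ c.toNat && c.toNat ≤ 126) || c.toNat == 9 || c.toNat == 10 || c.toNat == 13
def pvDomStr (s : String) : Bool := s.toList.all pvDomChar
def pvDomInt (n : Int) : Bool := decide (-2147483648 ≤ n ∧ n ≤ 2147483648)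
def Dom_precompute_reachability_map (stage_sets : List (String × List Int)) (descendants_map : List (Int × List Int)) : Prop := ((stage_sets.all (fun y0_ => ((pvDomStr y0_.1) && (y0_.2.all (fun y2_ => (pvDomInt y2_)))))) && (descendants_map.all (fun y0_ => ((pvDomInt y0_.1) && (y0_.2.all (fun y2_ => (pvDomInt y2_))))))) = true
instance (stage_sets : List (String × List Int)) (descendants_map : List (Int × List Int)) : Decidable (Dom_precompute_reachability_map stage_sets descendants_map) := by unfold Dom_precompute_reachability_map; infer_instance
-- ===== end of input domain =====

-- B transposes A's single-pass defaultdict accumulation into a hit-list + dedup + per-target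
-- membership scan; alternative decomposition, same results (no speed claim).


-- ===== PORT A =====
-- for s2 in s2_nodes: for t in descendants_map.get(s2, set()): if t in s3_nodes: s3_to_valid_s2[t].add(s2)
def precompute_reachability_map (stage_sets : List (String × List Int)) (descendants_map : List (Int × List Int)) : List (Int × List Int) :=
  match (PySem.Dict.mk stage_sets).get? "S2", (PySem.Dict.mk stage_sets).get? "S3" with
  | some s2_nodes, some s3_nodes =>
      (s2_nodes.foldl (fun d s2 =>
          ((PySem.Dict.mk descendants_map).getD s2 []).foldl (fun d t =>
            if t ∈ s3_nodes then d.modify t [] (fun v => PySem.Set.add v s2) else d) d)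
        PySem.Dict.empty).items
  | _, _ => []   -- KeyError in Python; excluded by Pre_

-- ===== PORT B =====
-- hits = [t for s2 in s2_nodes for t in descendants_map.get(s2, set()) if t in s3_nodes]
-- {t: {s2 for s2 in s2_nodes if t in descendants_map.get(s2, set())} for t in dict.fromkeys(hits)}
def precompute_reachability_map_alt (stage_sets : List (String × List Int)) (descendants_map : List (Int × List Int)) : List (Int × List Int) :=
  match (PySem.Dict.mk stage_sets).get? "S2" with
  | none => []   -- KeyError in Python; excluded by Pre_
  | some s2_nodes =>
    match (PySem.Dict.mk stage_sets).get? "S3" with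
    | none => []   -- KeyError in Python; excluded by Pre_
    | some s3_nodes =>
      let hits := s2_nodes.flatMap (fun s2 =>
        ((PySem.Dict.mk descendants_map).getD s2 []).filter (fun t => decide (t ∈ s3_nodes)))
      (PySem.List.dedup hits).map (fun t =>
        (t, PySem.Set.ofList (s2_nodes.filter (fun s2 => decide (t ∈ (PySem.Dict.mk descendants_map).getD s2 [])))))

-- ===== PRECONDITION & SPEC =====
-- Pre_ excludes exactly the inputs where stage_sets lacks key "S2" or "S3": there Python A raises KeyError.
def Pre_precompute_reachability_map (stage_sets : List (String × List Int)) (descendants_map : List (Int × List Int)) : Prop :=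
  ((PySem.Dict.mk stage_sets).get? "S2").isSome = true ∧ ((PySem.Dict.mk stage_sets).get? "S3").isSome = true
instance (stage_sets : List (String × List Int)) (descendants_map : List (Int × List Int)) : Decidable (Pre_precompute_reachability_map stage_sets descendants_map) := by unfold Pre_precompute_reachability_map; infer_instance

def pvWitness_precompute_reachability_map : (List (String × List Int)) × (List (Int × List Int)) :=
  ([("S2", [1, 4]), ("S3", [2, 3])], [(1, [2, 5]), (4, [3, 2])])

def Spec_precompute_reachability_map (stage_sets : List (String × List Int)) (descendants_map : List (Int × List Int)) (out : List (Int × List Int)) : Prop := out = precompute_reachability_map_alt stage_sets descendants_map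
instance (stage_sets : List (String × List Int)) (descendants_map : List (Int × List Int)) (out : List (Int × List Int)) : Decidable (Spec_precompute_reachability_map stage_sets descendants_map out) := by unfold Spec_precompute_reachability_map; infer_instance

-- ===== CLAIM (what is proved, stated in full; the proofs are below) =====
def Claim_equal_precompute_reachability_map : Prop := ∀ (stage_sets : List (String × List Int)) (descendants_map : List (Int × List Int)), Dom_precompute_reachability_map stage_sets descendants_map → Pre_precompute_reachability_map stage_sets descendants_map → Spec_precompute_reachability_map stage_sets descendants_map (precompute_reachability_map stage_sets descendants_map)

-- ===== LEMMAS AND PROOFS =====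

theorem pv_keys_insert (d : PySem.Dict Int (List Int)) (k : Int) (v : List Int) :
    (d.insert k v).keys = PySem.Set.add d.keys k := by
  by_cases h : d.contains k = true
  · rw [PySem.Dict.keys_insert_of_contains _ _ h, PySem.Set.add_of_mem]
    exact (PySem.Dict.contains_iff_mem_keys _ _).mp h
  · rw [PySem.Dict.keys_insert_of_not_contains _ _ (by simpa using h), PySem.Set.add_of_not_mem]
    exact fun hm => h ((PySem.Dict.contains_iff_mem_keys _ _).mpr hm)

-- inner loop of A at a fixed s2, over an arbitrary target list: value at key t
theorem pv_inner_getD (s3 ts : List Int) (d : PySem.Dict Int (List Int)) (t x : Int) :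
    ((ts.foldl (fun d u => if u ∈ s3 then d.modify u [] (fun v => PySem.Set.add v x) else d) d).getD t []) =
      if t ∈ ts ∧ t ∈ s3 then PySem.Set.add (d.getD t []) x else d.getD t [] := by
  induction ts generalizing d with
  | nil => simp
  | cons u ts ih =>
    simp only [List.foldl_cons, ih, List.mem_cons]
    by_cases hu : u ∈ s3
    · simp only [if_pos hu, PySem.Dict.getD_modify]
      by_cases h : t = u
      · subst h
        by_cases hm : t ∈ ts
        · simp [hm, hu]
        · simp [hm, hu]
      · by_cases hm : t ∈ ts ∧ t ∈ s3 <;> simp [h, hm]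
    · simp only [if_neg hu]
      by_cases h : t = u
      · subst h; simp [hu]
      · by_cases hm : t ∈ ts ∧ t ∈ s3 <;> simp [h, hm]

-- inner loop of A at a fixed s2: key list
theorem pv_inner_keys (s3 ts : List Int) (d : PySem.Dict Int (List Int)) (x : Int) :
    ((ts.foldl (fun d u => if u ∈ s3 then d.modify u [] (fun v => PySem.Set.add v x) else d) d).keys) =
      PySem.Set.update d.keys (ts.filter (fun u => decide (u ∈ s3))) := by
  induction ts generalizing d with
  | nil => simp [PySem.Set.update]
  | cons u ts ih =>
    simp only [List.foldl_cons, List.filter_cons]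
    by_cases hu : u ∈ s3
    · simp [hu, ih, pv_keys_insert, PySem.Set.update_cons]
    · simp [hu, ih]

-- the outer loop: value at a key t ∈ s3
theorem pv_outer_getD (s3 : List Int) (desc : Int → List Int) (L : List Int)
    (d : PySem.Dict Int (List Int)) (t : Int) (ht : t ∈ s3) :
    ((L.foldl (fun d s2 =>
        (desc s2).foldl (fun d u =>
          if u ∈ s3 then d.modify u [] (fun v => PySem.Set.add v s2) else d) d) d).getD t []) =
      L.foldl (fun v s2 => if t ∈ desc s2 then PySem.Set.add v s2 else v) (d.getD t []) := by
  induction L generalizing d with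
  | nil => rfl
  | cons x L ih =>
    simp only [List.foldl_cons, ih, pv_inner_getD]
    by_cases hm : t ∈ desc x
    · simp [hm, ht]
    · simp [hm]

-- the outer loop: key list
theorem pv_outer_keys (s3 : List Int) (desc : Int → List Int) (L : List Int)
    (d : PySem.Dict Int (List Int)) :
    ((L.foldl (fun d s2 =>
        (desc s2).foldl (fun d u =>
          if u ∈ s3 then d.modify u [] (fun v => PySem.Set.add v s2) else d) d) d).keys) =
      PySem.Set.update d.keys (L.flatMap (fun s2 => (desc s2).filter (fun u => decide (u ∈ s3)))) := by
  induction L generalizing d with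
  | nil => simp [PySem.Set.update]
  | cons x L ih =>
    simp only [List.foldl_cons, ih, pv_inner_keys, List.flatMap_cons, PySem.Set.update_append]

-- ===== VERDICT (by name: the statement is the Claim_ definition above) =====
theorem precompute_reachability_map_spec : Claim_equal_precompute_reachability_map := by
  intro stage_sets descendants_map _ hpre
  obtain ⟨h2, h3⟩ := hpre
  obtain ⟨s2n, hs2⟩ := Option.isSome_iff_exists.mp h2
  obtain ⟨s3n, hs3⟩ := Option.isSome_iff_exists.mp h3
  unfold Spec_precompute_reachability_map precompute_reachability_map precompute_reachability_map_alt
  rw [hs2, hs3]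
  simp only []
  have hkeys : (s2n.foldl (fun d s2 =>
      (((PySem.Dict.mk descendants_map).getD s2 [] : List Int)).foldl (fun d t =>
        if t ∈ s3n then d.modify t [] (fun v => PySem.Set.add v s2) else d) d)
      PySem.Dict.empty).keys = PySem.Set.ofList (s2n.flatMap (fun s2 =>
        ((PySem.Dict.mk descendants_map).getD s2 []).filter (fun t => decide (t ∈ s3n)))) := by
    rw [pv_outer_keys s3n (fun s2 => (PySem.Dict.mk descendants_map).getD s2 []) s2n PySem.Dict.empty]
    rw [show (PySem.Dict.empty : PySem.Dict Int (List Int)).keys = ([] : List Int) from rfl]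
    rw [PySem.Set.update_nil_left]
  rw [PySem.Dict.items_eq_map_keys _ (by rw [hkeys]; exact PySem.Set.nodup_ofList _) []]
  rw [hkeys, PySem.List.dedup_eq_ofList]
  apply List.map_congr_left
  intro t htmem
  have ht3 : t ∈ s3n := by
    rcases List.mem_flatMap.mp ((PySem.Set.mem_ofList _ _).mp htmem) with ⟨x, _, htf⟩
    simpa using (List.mem_filter.mp htf).2
  rw [pv_outer_getD s3n (fun s2 => (PySem.Dict.mk descendants_map).getD s2 []) s2n PySem.Dict.empty t ht3]
  rw [PySem.Set.ofList_eq_foldl, List.foldl_filter, PySem.Dict.getD_empty]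
  simp only [decide_eq_true_eq]
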